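-- pv_equiv track=rewrite | github.com/ResourceInteractive/reddit-seo-agent | main.py | find_best_blog_post_match
-- ===== SOURCE A (Python) =====
-- def find_best_blog_post_match(post_title, blog_data):
--     """
--     Finds the most relevant blog post based on the Reddit post's title.
--     """
--     post_title_words = set(post_title.lower().split())
--     best_match_slug = None
--     max_overlap = 0
--
--     for slug, content in blog_data.items():
--         slug_words = set(slug.replace('-', ' ').lower().split())
--         overlap = len(post_title_words.intersection(slug_words))
--
--         if overlap > max_overlap:
--             max_overlap = overlap
--             best_match_slug = slug
--
--     return best_match_slug
-- ===== SOURCE B (Python) =====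
-- def find_best_blog_post_match(post_title, blog_data):
--     """
--     Finds the most relevant blog post based on the Reddit post's title,
--     via an inverted word -> slugs index instead of per-slug intersections.
--     """
--     index = {}
--     for slug in blog_data:
--         for word in set(slug.replace('-', ' ').lower().split()):
--             index.setdefault(word, set()).add(slug)
--
--     counts = {}
--     for word in set(post_title.lower().split()):
--         for slug in index.get(word, ()):
--             counts[slug] = counts.get(slug, 0) + 1
--
--     best_match_slug = None
--     max_count = 0
--     for slug in blog_data:
--         count = counts.get(slug, 0)
--         if count > max_count:
--             max_count = count
--             best_match_slug = slug
--     return best_match_slug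
-- ===== Notes on version B (the rewrite author's own statement) =====
-- stated objective: alternative
-- what changed: B replaces A's per-slug set-intersection scan by an inverted word->slugs index plus a per-slug counter built from the title's words, then re-runs the original first-strict-improvement selection over the slugs.
import Mathlib
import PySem

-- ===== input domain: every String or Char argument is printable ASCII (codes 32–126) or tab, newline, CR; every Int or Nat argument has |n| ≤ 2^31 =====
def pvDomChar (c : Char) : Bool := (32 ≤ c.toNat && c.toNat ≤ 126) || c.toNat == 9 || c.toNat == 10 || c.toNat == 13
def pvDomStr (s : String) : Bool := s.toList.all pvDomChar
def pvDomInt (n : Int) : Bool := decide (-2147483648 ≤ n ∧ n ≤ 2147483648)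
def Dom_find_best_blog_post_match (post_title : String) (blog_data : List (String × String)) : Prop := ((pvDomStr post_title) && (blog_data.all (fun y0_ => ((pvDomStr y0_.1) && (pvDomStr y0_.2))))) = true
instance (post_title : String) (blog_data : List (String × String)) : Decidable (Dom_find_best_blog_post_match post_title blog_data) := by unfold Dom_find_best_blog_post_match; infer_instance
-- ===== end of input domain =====

-- B replaces A's per-slug set-intersection scan by an inverted word->slugs index and a counter,
-- keeping the same first-strict-improvement selection (objective: alternative algorithm, same cost class).

-- ===== PORT A =====
-- set(s.lower().split())
def pvWordSet (s : String) : PySem.Set String :=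
  PySem.Set.ofList (PySem.Str.split₀ (PySem.Str.lower s))

def find_best_blog_post_match (post_title : String) (blog_data : List (String × String)) : Option String :=
  let post_title_words := pvWordSet post_title
  (blog_data.foldl (fun (st : Option String × Int) p =>
      let slug_words := pvWordSet (PySem.Str.replace p.1 "-" " ")
      let overlap : Int := PySem.Set.len (PySem.Set.inter post_title_words slug_words)
      if st.2 < overlap then (some p.1, overlap) else st)
    ((none : Option String), (0 : Int))).1

-- ===== PORT B =====
-- set(slug.replace('-', ' ').lower().split())
def pvSlugWords (slug : String) : PySem.Set String :=
  pvWordSet (PySem.Str.replace slug "-" " ")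

-- inverted index: word -> set of slugs whose word set contains it (index.setdefault(w, set()).add(slug))
def pvIndex (blog_data : List (String × String)) : PySem.Dict String (PySem.Set String) :=
  blog_data.foldl
    (fun d p => (pvSlugWords p.1).foldl
      (fun d w => d.modify w PySem.Set.empty (fun s => PySem.Set.add s p.1)) d)
    PySem.Dict.empty

-- counts[slug] = number of distinct title words occurring in slug's word set
def pvCounts (post_title : String) (blog_data : List (String × String)) : PySem.Dict String Int :=
  (pvWordSet post_title).foldl
    (fun c w => ((pvIndex blog_data).getD w PySem.Set.empty).foldl
      (fun c slug => c.insert slug (c.getD slug 0 + 1)) c)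
    PySem.Dict.empty

def find_best_blog_post_match_alt (post_title : String) (blog_data : List (String × String)) : Option String :=
  let counts := pvCounts post_title blog_data
  (blog_data.foldl (fun (st : Option String × Int) p =>
      let count : Int := counts.getD p.1 0
      if st.2 < count then (some p.1, count) else st)
    ((none : Option String), (0 : Int))).1

-- ===== PRECONDITION & SPEC =====
def Spec_find_best_blog_post_match (post_title : String) (blog_data : List (String × String)) (out : Option String) : Prop := out = find_best_blog_post_match_alt post_title blog_data
instance (post_title : String) (blog_data : List (String × String)) (out : Option String) : Decidable (Spec_find_best_blog_post_match post_title blog_data out) := by unfold Spec_find_best_blog_post_match; infer_instance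

-- ===== CLAIM (what is proved, stated in full; the proofs are below) =====
def Claim_equal_find_best_blog_post_match : Prop := ∀ (post_title : String) (blog_data : List (String × String)), Dom_find_best_blog_post_match post_title blog_data → Spec_find_best_blog_post_match post_title blog_data (find_best_blog_post_match post_title blog_data)

-- ===== LEMMAS AND PROOFS =====
set_option maxHeartbeats 1000000

theorem pv_add_eq (s : PySem.Set String) (v : String) :
    PySem.Set.add s v = if v ∈ s then s else s ++ [v] := by
  simp [PySem.Set.add]

theorem pv_add_nodup (s : PySem.Set String) (v : String) (h : s.Nodup) :
    (PySem.Set.add s v).Nodup := by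
  by_cases hm : v ∈ s
  · simpa [pv_add_eq, hm] using h
  · rw [pv_add_eq, if_neg hm]
    exact List.Nodup.append h (List.nodup_singleton v) (by simpa using hm)

theorem pv_inner_getD (ws : List String) (v : String)
    (d : PySem.Dict String (PySem.Set String)) (w' : String) :
    (ws.foldl (fun d w => d.modify w PySem.Set.empty (fun s => PySem.Set.add s v)) d).getD w' PySem.Set.empty
      = if w' ∈ ws then PySem.Set.add (d.getD w' PySem.Set.empty) v
        else d.getD w' PySem.Set.empty := by
  induction ws generalizing d with
  | nil => simp
  | cons w t ih =>
    rw [List.foldl_cons, ih, PySem.Dict.getD_modify]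
    by_cases h1 : w' ∈ t <;> by_cases h2 : w' = w <;>
      simp [h1, h2]

theorem pv_index_getD (blog_data : List (String × String)) (w : String)
    (d : PySem.Dict String (PySem.Set String)) :
    (blog_data.foldl
      (fun d p => (pvSlugWords p.1).foldl
        (fun d w => d.modify w PySem.Set.empty (fun s => PySem.Set.add s p.1)) d) d).getD w PySem.Set.empty
    = blog_data.foldl
        (fun s p => if w ∈ pvSlugWords p.1 then PySem.Set.add s p.1 else s)
        (d.getD w PySem.Set.empty) := by
  induction blog_data generalizing d with
  | nil => rfl
  | cons p t ih =>
    rw [List.foldl_cons, List.foldl_cons, ih, pv_inner_getD]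

theorem pv_fold_add_mem (l : List (String × String)) (w slug : String) (s : PySem.Set String) :
    slug ∈ l.foldl (fun s p => if w ∈ pvSlugWords p.1 then PySem.Set.add s p.1 else s) s
      ↔ slug ∈ s ∨ ∃ p ∈ l, slug = p.1 ∧ w ∈ pvSlugWords p.1 := by
  induction l generalizing s with
  | nil => simp
  | cons p t ih =>
    rw [List.foldl_cons]
    by_cases h : w ∈ pvSlugWords p.1
    · rw [if_pos h, ih]
      constructor
      · rintro (h1 | ⟨q, hq, rfl, hw⟩)
        · rcases (PySem.Set.mem_add s p.1 slug).mp h1 with h2 | h2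
          · exact Or.inl h2
          · exact Or.inr ⟨p, List.mem_cons_self, h2, h⟩
        · exact Or.inr ⟨q, List.mem_cons_of_mem p hq, rfl, hw⟩
      · rintro (h1 | ⟨q, hq, rfl, hw⟩)
        · exact Or.inl ((PySem.Set.mem_add s p.1 slug).mpr (Or.inl h1))
        · rcases List.mem_cons.mp hq with rfl | hq'
          · exact Or.inl ((PySem.Set.mem_add s q.1 q.1).mpr (Or.inr rfl))
          · exact Or.inr ⟨q, hq', rfl, hw⟩
    · rw [if_neg h, ih]
      constructor
      · rintro (h1 | ⟨q, hq, rfl, hw⟩)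
        · exact Or.inl h1
        · exact Or.inr ⟨q, List.mem_cons_of_mem p hq, rfl, hw⟩
      · rintro (h1 | ⟨q, hq, rfl, hw⟩)
        · exact Or.inl h1
        · rcases List.mem_cons.mp hq with rfl | hq'
          · exact absurd hw h
          · exact Or.inr ⟨q, hq', rfl, hw⟩

theorem pv_fold_add_nodup (l : List (String × String)) (w : String) (s : PySem.Set String)
    (h : s.Nodup) :
    (l.foldl (fun s p => if w ∈ pvSlugWords p.1 then PySem.Set.add s p.1 else s) s).Nodup := by
  induction l generalizing s with
  | nil => exact h
  | cons p t ih =>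
    rw [List.foldl_cons]
    by_cases hw : w ∈ pvSlugWords p.1
    · rw [if_pos hw]; exact ih _ (pv_add_nodup _ _ h)
    · rw [if_neg hw]; exact ih _ h

theorem pv_index_mem (blog_data : List (String × String)) (w slug : String) :
    slug ∈ (pvIndex blog_data).getD w PySem.Set.empty
      ↔ ∃ p ∈ blog_data, slug = p.1 ∧ w ∈ pvSlugWords p.1 := by
  unfold pvIndex
  rw [pv_index_getD]
  simpa using pv_fold_add_mem blog_data w slug ((PySem.Dict.empty).getD w PySem.Set.empty)

theorem pv_index_nodup (blog_data : List (String × String)) (w : String) :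
    ((pvIndex blog_data).getD w PySem.Set.empty).Nodup := by
  unfold pvIndex
  rw [pv_index_getD]
  exact pv_fold_add_nodup _ _ _ (by simp [PySem.Set.empty])

-- count of slug in index[w], for a slug that is a key of blog_data
theorem pv_index_count (blog_data : List (String × String)) (w : String)
    (p : String × String) (hp : p ∈ blog_data) :
    (((pvIndex blog_data).getD w PySem.Set.empty).count p.1 : Int)
      = if w ∈ pvSlugWords p.1 then 1 else 0 := by
  by_cases h : w ∈ pvSlugWords p.1
  · have hmem : p.1 ∈ (pvIndex blog_data).getD w PySem.Set.empty :=
      (pv_index_mem blog_data w p.1).mpr ⟨p, hp, rfl, h⟩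
    have hc := List.count_eq_one_of_mem (pv_index_nodup blog_data w) hmem
    rw [if_pos h, hc]
    simp
  · have hmem : p.1 ∉ (pvIndex blog_data).getD w PySem.Set.empty := by
      intro hm
      rcases (pv_index_mem blog_data w p.1).mp hm with ⟨q, _, hq, hwq⟩
      exact h (hq ▸ hwq)
    rw [if_neg h, List.count_eq_zero.mpr hmem]
    simp

theorem pv_counts_fold (tw : List String) (blog_data : List (String × String))
    (slug : String) (c : PySem.Dict String Int) :
    (tw.foldl (fun c w => ((pvIndex blog_data).getD w PySem.Set.empty).foldl
        (fun c slug => c.insert slug (c.getD slug 0 + 1)) c) c).getD slug 0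
      = c.getD slug 0
        + (tw.map (fun w => (((pvIndex blog_data).getD w PySem.Set.empty).count slug : Int))).sum := by
  induction tw generalizing c with
  | nil => simp
  | cons w t ih =>
    rw [List.foldl_cons, ih, PySem.Dict.getD_foldl_insert_add_one, List.map_cons, List.sum_cons]
    ring

theorem pv_sum_ite (tw : List String) (P : String → Prop) [DecidablePred P] :
    (tw.map (fun w => if P w then (1 : Int) else 0)).sum
      = ((tw.filter (fun w => decide (P w))).length : Int) := by
  induction tw with
  | nil => simp
  | cons w t ih =>
    by_cases h : P w
    · simp [h, ih]
      omega
    · simp [h, ih]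

theorem pv_decide_mem (s : PySem.Set String) :
    (fun w => decide (w ∈ s)) = fun w => PySem.Set.contains s w := by
  funext w
  by_cases hw : w ∈ s <;> simp [PySem.Set.contains, hw]

theorem pv_counts_getD (post_title : String) (blog_data : List (String × String))
    (p : String × String) (hp : p ∈ blog_data) :
    (pvCounts post_title blog_data).getD p.1 0
      = PySem.Set.len (PySem.Set.inter (pvWordSet post_title) (pvSlugWords p.1)) := by
  unfold pvCounts
  rw [pv_counts_fold]
  have h1 : ((pvWordSet post_title).map
      (fun w => (((pvIndex blog_data).getD w PySem.Set.empty).count p.1 : Int))).sum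
      = ((pvWordSet post_title).map (fun w => if w ∈ pvSlugWords p.1 then (1 : Int) else 0)).sum := by
    exact congrArg List.sum
      (List.map_congr_left (fun w _ => pv_index_count blog_data w p hp))
  rw [h1, pv_sum_ite (pvWordSet post_title) (fun w => w ∈ pvSlugWords p.1)]
  rw [pv_decide_mem (pvSlugWords p.1)]
  simp [PySem.Set.len, PySem.Set.inter]

-- ===== VERDICT (by name: the statement is the Claim_ definition above) =====
theorem find_best_blog_post_match_spec : Claim_equal_find_best_blog_post_match := by
  intro post_title blog_data _
  unfold Spec_find_best_blog_post_match find_best_blog_post_match find_best_blog_post_match_alt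
  refine congrArg Prod.fst (PySem.List.foldl_congr_mem _ _ _ _ ?_)
  intro acc p hp
  dsimp only
  rw [pv_counts_getD post_title blog_data p hp]
  rfl
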